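-- pv_equiv track=rewrite | github.com/robynlgy/problem-solving | LeetCode/981 Time Based Key-Value Store.py | max_prev_time
-- ===== SOURCE A (Python) =====
-- def max_prev_time(timemap: dict , timestamp: int) -> int:
--     times = timemap['times']
--     if timestamp < times[0]: return -1
--     #max less than timestamp
--     l , r = 0 , len(times)
--     while l < r:
--         m = (l + r )//2
--
--         if times[m] <= timestamp:
--             l = m + 1
--         elif times[m] > timestamp:
--             r = m
--     return times[l-1]
-- ===== SOURCE B (Python) =====
-- def max_prev_time(timemap: dict, timestamp: int) -> int:
--     times = timemap['times']
--     if timestamp < times[0]: return -1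
--     # single left-to-right pass: keep the latest (hence largest, list is sorted) value <= timestamp
--     best = times[0]
--     for t in times[1:]:
--         if t <= timestamp:
--             best = t
--     return best
-- ===== Notes on version B (the rewrite author's own statement) =====
-- stated objective: simpler
-- what changed: Replaced the binary-search halving loop with a single linear pass that keeps the last element <= timestamp; Pre_ requires the 'times' entry to exist and be non-empty, and (unless the timestamp < times[0] guard fires, where both return -1) sorted non-decreasingly, since binary search on unsorted data returns an accidental element.
-- outside the precondition, e.g. on max_prev_time({'times': [1, 5, 2]}, 3): A returns 1, B returns 2
import Mathlib
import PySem

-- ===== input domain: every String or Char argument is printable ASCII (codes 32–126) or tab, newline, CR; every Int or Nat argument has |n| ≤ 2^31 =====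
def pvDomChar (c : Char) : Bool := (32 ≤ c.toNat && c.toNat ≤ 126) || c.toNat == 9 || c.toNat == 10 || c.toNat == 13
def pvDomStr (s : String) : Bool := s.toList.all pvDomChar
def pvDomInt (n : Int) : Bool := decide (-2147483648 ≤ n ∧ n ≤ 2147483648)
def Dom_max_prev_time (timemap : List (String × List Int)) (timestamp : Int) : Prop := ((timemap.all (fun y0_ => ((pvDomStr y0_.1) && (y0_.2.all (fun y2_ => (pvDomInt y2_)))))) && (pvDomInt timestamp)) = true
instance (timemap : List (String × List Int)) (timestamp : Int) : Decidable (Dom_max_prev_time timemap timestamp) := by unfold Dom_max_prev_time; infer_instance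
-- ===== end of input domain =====

-- B replaces A's binary-search loop with one linear pass keeping the last element ≤ timestamp (simpler; same result on sorted 'times').

-- ===== PORT A =====
-- the while-loop of A; terminates because r - l strictly decreases
def pvBisect (times : List Int) (timestamp : Int) (l r : Nat) : Nat :=
  if _h : l < r then
    let m := (l + r) / 2            -- (l + r) // 2, both nonnegative
    match PySem.List.pyGet? times (m : Int) with
    | none => l                      -- IndexError (never reached: m < r ≤ len under Pre_)
    | some v =>
      if v ≤ timestamp then pvBisect times timestamp (m + 1) r
      else pvBisect times timestamp l m    -- elif times[m] > timestamp
  else l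
  termination_by r - l
  decreasing_by all_goals omega

def max_prev_time (timemap : List (String × List Int)) (timestamp : Int) : Int :=
  match (PySem.Dict.mk timemap).get? "times" with
  | none => 0                        -- KeyError (outside Pre_)
  | some times =>
    match PySem.List.pyGet? times 0 with
    | none => 0                      -- IndexError on times[0] (outside Pre_)
    | some t0 =>
      if timestamp < t0 then -1
      else
        let l := pvBisect times timestamp 0 times.length
        match PySem.List.pyGet? times ((l : Int) - 1) with
        | some v => v
        | none => 0                  -- IndexError (never reached under Pre_)

-- ===== PORT B =====
def max_prev_time_alt (timemap : List (String × List Int)) (timestamp : Int) : Int :=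
  match (PySem.Dict.mk timemap).get? "times" with
  | none => 0                        -- KeyError (outside Pre_)
  | some times =>
    match PySem.List.pyGet? times 0 with
    | none => 0                      -- IndexError on times[0] (outside Pre_)
    | some t0 =>
      if timestamp < t0 then -1
      else
        -- for t in times[1:]: if t <= timestamp: best = t
        (times.drop 1).foldl (fun best t => if t ≤ timestamp then t else best) t0

-- ===== PRECONDITION & SPEC =====
-- Pre_ excludes: a missing 'times' key (KeyError) and an empty times list (IndexError), where A raises;
-- and times not sorted non-decreasingly when the guard does not fire (timestamp ≥ times[0]), where A's
-- binary search returns an accidental element of the unsorted list.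
def Pre_max_prev_time (timemap : List (String × List Int)) (timestamp : Int) : Prop :=
  ((PySem.Dict.mk timemap).get? "times").getD [] ≠ [] ∧
  (timestamp < (((PySem.Dict.mk timemap).get? "times").getD []).headD 0 ∨
   List.Pairwise (· ≤ ·) (((PySem.Dict.mk timemap).get? "times").getD []))
instance (timemap : List (String × List Int)) (timestamp : Int) : Decidable (Pre_max_prev_time timemap timestamp) := by unfold Pre_max_prev_time; infer_instance

def pvWitness_max_prev_time : (List (String × List Int)) × Int := ([("times", [1, 2, 5])], 3)

def Spec_max_prev_time (timemap : List (String × List Int)) (timestamp : Int) (out : Int) : Prop := out = max_prev_time_alt timemap timestamp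
instance (timemap : List (String × List Int)) (timestamp : Int) (out : Int) : Decidable (Spec_max_prev_time timemap timestamp out) := by unfold Spec_max_prev_time; infer_instance

-- ===== CLAIM (what is proved, stated in full; the proofs are below) =====
def Claim_equal_max_prev_time : Prop := ∀ (timemap : List (String × List Int)) (timestamp : Int), Dom_max_prev_time timemap timestamp → Pre_max_prev_time timemap timestamp → Spec_max_prev_time timemap timestamp (max_prev_time timemap timestamp)

-- ===== LEMMAS AND PROOFS =====

-- B's fold returns the last element ≤ ts of the scanned list (or the accumulator if there is none)
theorem pvFoldl_last_le (ts : Int) : ∀ (xs : List Int) (acc : Int),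
    xs.foldl (fun best t => if t ≤ ts then t else best) acc
      = ((xs.filter (fun t => t ≤ ts)).getLast?).getD acc := by
  intro xs
  induction xs with
  | nil => intro acc; simp
  | cons x xs ih =>
    intro acc
    by_cases hx : x ≤ ts
    · rw [List.foldl_cons, if_pos hx, ih x, List.filter_cons, if_pos (by simpa using hx)]
      cases hfx : xs.filter (fun t => decide (t ≤ ts)) with
      | nil => simp
      | cons y ys =>
        rw [List.getLast?_eq_some_getLast (show (x :: y :: ys : List Int) ≠ [] by simp), Option.getD_some,
          List.getLast_cons (by simp), List.getLast?_eq_some_getLast (show (y :: ys : List Int) ≠ [] by simp),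
          Option.getD_some]
    · rw [List.foldl_cons, if_neg hx, ih acc, List.filter_cons, if_neg (by simpa using hx)]

-- if the predicate holds exactly on the first k positions, filtering is taking
theorem pvFilter_eq_take (ts : Int) : ∀ (xs : List Int) (k : Nat),
    (∀ i (h : i < xs.length), (xs[i] ≤ ts ↔ i < k)) →
    xs.filter (fun t => t ≤ ts) = xs.take k := by
  intro xs
  induction xs with
  | nil => intro k _; simp
  | cons x xs ih =>
    intro k hk
    cases k with
    | zero =>
      have hall : ∀ t ∈ x :: xs, ¬ t ≤ ts := by
        intro t ht
        obtain ⟨i, hi, rfl⟩ := List.mem_iff_getElem.mp ht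
        intro hle
        exact absurd ((hk i hi).mp hle) (by omega)
      rw [List.take_zero, List.filter_eq_nil_iff.mpr (by intro t ht; simpa using hall t ht)]
    | succ k' =>
      have hx : x ≤ ts := (hk 0 (by simp)).mpr (by omega)
      rw [List.filter_cons, if_pos (by simpa using hx), List.take_succ_cons]
      rw [ih k' (by intro i hi; have := hk (i+1) (by simpa using Nat.succ_lt_succ hi); simpa [Nat.succ_lt_succ_iff] using this)]

-- invariant of A's binary-search loop, for a non-decreasing list
theorem pvBisect_inv (xs : List Int) (ts : Int)
    (mono : ∀ i j (hi : i < xs.length) (hj : j < xs.length), i ≤ j → xs[i] ≤ xs[j]) :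
    ∀ (l r : Nat), l ≤ r → r ≤ xs.length →
    (∀ i (h : i < xs.length), i < l → xs[i] ≤ ts) →
    (∀ i (h : i < xs.length), r ≤ i → ts < xs[i]) →
    l ≤ pvBisect xs ts l r ∧ pvBisect xs ts l r ≤ r ∧
    (∀ i (h : i < xs.length), i < pvBisect xs ts l r → xs[i] ≤ ts) ∧
    (∀ i (h : i < xs.length), pvBisect xs ts l r ≤ i → ts < xs[i]) := by
  intro l r hlr hr hl hrr
  by_cases h : l < r
  · have hm : (l + r) / 2 < xs.length := by omega
    have hg : PySem.List.pyGet? xs (((l + r) / 2 : Nat) : Int) = some (xs[(l + r) / 2]) := by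
      rw [PySem.List.pyGet?_natCast, List.getElem?_eq_getElem hm]
    rw [pvBisect]
    simp only [dif_pos h, hg]
    by_cases hv : xs[(l + r) / 2] ≤ ts
    · rw [if_pos hv]
      have step := pvBisect_inv xs ts mono ((l + r) / 2 + 1) r (by omega) hr
        (by intro i hi hil
            exact le_trans (mono i ((l + r) / 2) hi hm (by omega)) hv)
        hrr
      exact ⟨by omega, step.2.1, step.2.2⟩
    · rw [if_neg hv]
      push Not at hv
      have step := pvBisect_inv xs ts mono l ((l + r) / 2) (by omega) (by omega) hl
        (by intro i hi him
            exact lt_of_lt_of_le hv (mono ((l + r) / 2) i hm hi him))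
      exact ⟨step.1, by omega, step.2.2⟩
  · rw [pvBisect, dif_neg h]
    exact ⟨le_refl l, hlr, hl, fun i hi hli => hrr i hi (by omega)⟩
  termination_by l r => r - l
  decreasing_by all_goals omega

-- ===== VERDICT (by name: the statement is the Claim_ definition above) =====
theorem max_prev_time_spec : Claim_equal_max_prev_time := by
  intro timemap timestamp _hdom hpre
  obtain ⟨hne, hpwor⟩ := hpre
  unfold Spec_max_prev_time max_prev_time max_prev_time_alt
  cases hget : (PySem.Dict.mk timemap).get? "times" with
  | none => simp [hget] at hne
  | some times =>
  rw [hget] at hne hpwor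
  simp only [Option.getD_some] at hne hpwor
  cases htimes : times with
  | nil => exact absurd htimes hne
  | cons hd tl =>
  subst htimes
  simp only [PySem.List.pyGet?_zero_cons]
  by_cases hts : timestamp < hd
  · rw [if_pos hts, if_pos hts]
  · rw [if_neg hts, if_neg hts]
    have hpw : List.Pairwise (· ≤ ·) (hd :: tl) := by
      rcases hpwor with hlt | hpw
      · exact absurd (by simpa using hlt) hts
      · exact hpw
    push Not at hts
    set xs : List Int := hd :: tl with hxs
    have hlen : 0 < xs.length := by simp [hxs]
    have mono : ∀ i j (hi : i < xs.length) (hj : j < xs.length), i ≤ j → xs[i] ≤ xs[j] := by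
      intro i j hi hj hij
      rcases Nat.lt_or_ge i j with hlt | hge
      · exact List.pairwise_iff_getElem.mp hpw i j hi hj hlt
      · have : i = j := by omega
        subst this; exact le_refl _
    have inv := pvBisect_inv xs timestamp mono 0 xs.length (by omega) (le_refl _)
      (by intro i hi h0; omega) (by intro i hi hli; omega)
    set l' := pvBisect xs timestamp 0 xs.length with hl'
    obtain ⟨_, hl'le, hbelow, habove⟩ := inv
    have hx0 : xs[0]'hlen = hd := rfl
    have hl'pos : 1 ≤ l' := by
      by_contra hc
      have := habove 0 hlen (by omega)
      rw [hx0] at this; omega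
    have hAidx : ((l' : Int) - 1) = ((l' - 1 : Nat) : Int) := by omega
    rw [hAidx, PySem.List.pyGet?_natCast, List.getElem?_eq_getElem (by omega)]
    simp only []
    -- B's fold equals the last kept (≤ timestamp) element
    rw [pvFoldl_last_le timestamp _ hd]
    have hfilter : xs.filter (fun t => t ≤ timestamp) = xs.take l' :=
      pvFilter_eq_take timestamp xs l' (by
        intro i hi
        constructor
        · intro hle
          by_contra hc
          exact absurd hle (not_le.mpr (habove i hi (by omega)))
        · intro hil; exact hbelow i hi hil)
    have hfilter_tl : xs.filter (fun t => t ≤ timestamp) = hd :: tl.filter (fun t => t ≤ timestamp) := by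
      rw [hxs, List.filter_cons, if_pos (by simpa using hts)]
    have htake_last : (xs.take l').getLast? = some (xs[l' - 1]'(by omega)) := by
      rw [List.getLast?_eq_getElem?, List.length_take, Nat.min_eq_left hl'le,
        List.getElem?_take, if_pos (by omega), List.getElem?_eq_getElem (by omega)]
    have hlast_tl : (tl.filter (fun t => t ≤ timestamp)).getLast?.getD hd = xs[l' - 1]'(by omega) := by
      have hcons : (hd :: tl.filter (fun t => t ≤ timestamp)).getLast? = some (xs[l' - 1]'(by omega)) := by
        rw [← hfilter_tl, hfilter, htake_last]
      rcases hcase : tl.filter (fun t => t ≤ timestamp) with _ | ⟨y, ys⟩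
      · rw [hcase] at hcons
        simpa using hcons
      · rw [hcase] at hcons
        rw [List.getLast?_cons_cons] at hcons
        rw [hcons]
        rfl
    show xs[l' - 1]'(by omega) = (List.filter (fun t => decide (t ≤ timestamp)) (List.drop 1 xs)).getLast?.getD hd
    have hdrop : xs.drop 1 = tl := rfl
    rw [hdrop, hlast_tl]
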